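-- pv_equiv track=rewrite | github.com/xDuinoRails/xDuinoRails_Ares-M | pio_selectrix.py | _symbols2_to_words
-- ===== SOURCE A (Python) =====
-- def _symbols2_to_words(symbols):
--     """
--     Packt 2-Bit-Symbole (MSB-first) in 32-Bit-Wörter für OSR (SHIFT_LEFT).
--     Erstes Symbol -> Bits 31:30, nächstes -> 29:28, ...
--     """
--     out = []
--     i = 0
--     n = len(symbols)
--     while i < n:
--         w = 0
--         take = min(16, n - i)  # 16 Symbole * 2 Bit = 32 Bits
--         for s in range(take):
--             val = symbols[i + s] & 0b11
--             shift = 30 - 2*s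
--             w |= (val << shift)
--         out.append(w)
--         i += take
--     return out
-- ===== SOURCE B (Python) =====
-- def _symbols2_to_words(symbols):
--     """
--     Packt 2-Bit-Symbole (MSB-first) in 32-Bit-Woerter fuer OSR (SHIFT_LEFT).
--     Alternative: ein einziger Durchlauf mit Horner-Akkumulator; volle Woerter
--     werden sofort ausgegeben, ein letztes Teilwort wird am Ende links ausgerichtet.
--     """
--     out = []
--     acc = 0
--     count = 0
--     for s in symbols:
--         acc = acc * 4 + (s & 0b11)
--         count += 1
--         if count == 16:
--             out.append(acc)
--             acc = 0
--             count = 0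
--     if count:
--         out.append(acc << (32 - 2 * count))
--     return out
-- ===== Notes on version B (the rewrite author's own statement) =====
-- stated objective: faster
-- what changed: A walks an index in 16-symbol chunks and builds each word with per-position shifts (w |= (s&3) << (30-2*k)) in a nested loop; B makes a single pass with a base-4 Horner accumulator (acc = acc*4 + (s&3)), flushing a finished word every 16 symbols and left-aligning one final partial word with a single shift after the loop.
import Mathlib
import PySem

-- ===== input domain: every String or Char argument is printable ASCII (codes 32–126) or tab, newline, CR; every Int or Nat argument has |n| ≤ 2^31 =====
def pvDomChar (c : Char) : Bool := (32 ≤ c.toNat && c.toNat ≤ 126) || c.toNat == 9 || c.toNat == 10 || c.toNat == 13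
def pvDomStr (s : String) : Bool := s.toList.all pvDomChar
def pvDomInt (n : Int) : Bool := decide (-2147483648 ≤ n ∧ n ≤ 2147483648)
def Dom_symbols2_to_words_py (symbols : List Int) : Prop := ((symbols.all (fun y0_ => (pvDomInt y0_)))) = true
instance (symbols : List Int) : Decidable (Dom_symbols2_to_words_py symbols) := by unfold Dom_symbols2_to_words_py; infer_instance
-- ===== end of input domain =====

-- B replaces A's index-chunked, per-position-shift packing by a single pass with a
-- base-4 Horner accumulator that flushes a word every 16 symbols (objective: faster by a
-- constant factor — fewer Python-level ops per symbol; measured).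

-- ===== PORT A =====
-- inner 'for s in range(take)' loop; 30 - 2*s is Nat subtraction, exact since A only calls it with take ≤ 16
def pyA_word (symbols : List Int) (i take : Nat) : Int :=
  (List.range take).foldl (fun w s =>
    PySem.Int.bor w
      ((PySem.Int.band (PySem.List.pyGetD symbols ((i + s : Nat) : Int) 0) 3) <<< (30 - 2 * s))) 0

-- the 'while i < n' loop with state (i, out)
def pyA_loop (symbols : List Int) (i : Nat) (out : List Int) : List Int :=
  if i < symbols.length then
    pyA_loop symbols (i + min 16 (symbols.length - i))
      (out ++ [pyA_word symbols i (min 16 (symbols.length - i))])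
  else out
termination_by symbols.length - i
decreasing_by omega

def symbols2_to_words_py (symbols : List Int) : List Int := pyA_loop symbols 0 []

-- ===== PORT B =====
-- loop body of Source B: state (out, acc, count)
def pyB_step (st : List Int × Int × Int) (s : Int) : List Int × Int × Int :=
  let acc := st.2.1 * 4 + PySem.Int.band s 3
  let count := st.2.2 + 1
  if count == 16 then (st.1 ++ [acc], 0, 0) else (st.1, acc, count)

def symbols2_to_words_py_alt (symbols : List Int) : List Int :=
  let st := symbols.foldl pyB_step ([], 0, 0)
  -- Python 'acc << (32 - 2*count)': the shift amount is provably ≥ 0 here, so .toNat is exact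
  if st.2.2 ≠ 0 then st.1 ++ [st.2.1 <<< (32 - 2 * st.2.2).toNat] else st.1

-- ===== PRECONDITION & SPEC =====
def Spec_symbols2_to_words_py (symbols : List Int) (out : List Int) : Prop := out = symbols2_to_words_py_alt symbols
instance (symbols : List Int) (out : List Int) : Decidable (Spec_symbols2_to_words_py symbols out) := by unfold Spec_symbols2_to_words_py; infer_instance

-- ===== CLAIM (what is proved, stated in full; the proofs are below) =====
def Claim_equal_symbols2_to_words_py : Prop := ∀ (symbols : List Int), Dom_symbols2_to_words_py symbols → Spec_symbols2_to_words_py symbols (symbols2_to_words_py symbols)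

-- ===== LEMMAS AND PROOFS =====

-- the common "value of a chunk" function: base-4 Horner over s & 3
def h4 (l : List Int) : Int := l.foldl (fun b s => b * 4 + PySem.Int.band s 3) 0

-- the reference word list both ports are proved equal to
def wSpec (l : List Int) : List Int :=
  if l = [] then [] else
    (h4 (l.take 16) * 2 ^ (32 - 2 * (l.take 16).length)) :: wSpec (l.drop 16)
termination_by l.length
decreasing_by
  rename_i h
  have : l.length ≠ 0 := fun h0 => h (List.eq_nil_of_length_eq_zero h0)
  simp [List.length_drop]; omega

lemma band3_bounds (s : Int) : 0 ≤ PySem.Int.band s 3 ∧ PySem.Int.band s 3 < 4 := by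
  have h1 : s.toNat &&& Int.toNat 3 ≤ Int.toNat 3 := Nat.and_le_right
  have h2 : Int.toNat 3 &&& (-s-1).toNat ≤ Int.toNat 3 := Nat.and_le_left
  have h3 : Int.toNat 3 = 3 := rfl
  unfold PySem.Int.band
  split_ifs <;> omega

lemma h4_shift (l : List Int) : ∀ a : Int,
    l.foldl (fun b s => b * 4 + PySem.Int.band s 3) a = a * 4 ^ l.length + h4 l := by
  induction l with
  | nil => simp [h4]
  | cons x t ih =>
    intro a
    have hx : h4 (x :: t) = PySem.Int.band x 3 * 4 ^ t.length + h4 t := by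
      unfold h4
      rw [List.foldl_cons, ih]
      unfold h4
      ring
    rw [List.foldl_cons, ih, hx, List.length_cons]
    ring

lemma h4_bounds (l : List Int) : 0 ≤ h4 l ∧ h4 l < 4 ^ l.length := by
  induction l with
  | nil => simp [h4]
  | cons x t ih =>
    have hb := band3_bounds x
    have hp : (0:Int) < 4 ^ t.length := by positivity
    have hx : h4 (x :: t) = PySem.Int.band x 3 * 4 ^ t.length + h4 t := by
      unfold h4
      rw [List.foldl_cons, h4_shift]
      unfold h4
      ring
    rw [hx, List.length_cons, pow_succ]
    constructor
    · nlinarith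
    · nlinarith

lemma bor_disjoint (x y : Int) (k : Nat) (hx : 0 ≤ x) (hd : (2:Int) ^ k ∣ x)
    (hy : 0 ≤ y) (hyk : y < 2 ^ k) : PySem.Int.bor x y = x + y := by
  obtain ⟨c, hc⟩ := hd
  have hc0 : 0 ≤ c := by nlinarith [pow_pos (show (0:Int) < 2 by norm_num) k]
  have hm : x.toNat = c.toNat * 2 ^ k := by
    have : ((x.toNat : Int)) = ((c.toNat * 2 ^ k : Nat) : Int) := by
      push_cast
      rw [Int.toNat_of_nonneg hx, Int.toNat_of_nonneg hc0]
      linarith [hc]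
    exact_mod_cast this
  have hpk : y.toNat < 2 ^ k := by
    have h2 : ((2:Int) ^ k) = ((2 ^ k : Nat) : Int) := by push_cast; ring
    omega
  have key : x.toNat ||| y.toNat = x.toNat + y.toNat := by
    rw [hm, ← Nat.shiftLeft_eq]
    exact (Nat.shiftLeft_add_eq_or_of_lt hpk c.toNat).symm
  unfold PySem.Int.bor
  rw [if_pos hx, if_pos hy, key]
  push_cast
  rw [Int.toNat_of_nonneg hx, Int.toNat_of_nonneg hy]

-- A's inner loop: one step appended
lemma pyA_word_succ (symbols : List Int) (i t : Nat) :
    pyA_word symbols i (t+1) =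
      PySem.Int.bor (pyA_word symbols i t)
        ((PySem.Int.band (PySem.List.pyGetD symbols ((i + t : Nat) : Int) 0) 3) <<< (30 - 2 * t)) := by
  unfold pyA_word
  rw [List.range_succ, List.foldl_append]
  rfl

lemma h4_append_singleton (p : List Int) (e : Int) :
    h4 (p ++ [e]) = h4 p * 4 + PySem.Int.band e 3 := by
  unfold h4
  rw [List.foldl_append]
  rfl

-- A's inner loop computes the left-aligned Horner value of the chunk
lemma pyA_word_eq (symbols : List Int) (i : Nat) : ∀ take : Nat, take ≤ 16 →
    i + take ≤ symbols.length →
    pyA_word symbols i take = h4 ((symbols.drop i).take take) * 2 ^ (32 - 2 * take) := by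
  intro take
  induction take with
  | zero => intro _ _; simp [pyA_word, h4]
  | succ t ih =>
    intro h16 hn
    have hi : i + t < symbols.length := by omega
    have hdl : t < (symbols.drop i).length := by simp; omega
    rw [pyA_word_succ, ih (by omega) (by omega)]
    have hget : PySem.List.pyGetD symbols ((i + t : Nat) : Int) 0 = symbols[i + t] := by
      rw [PySem.List.pyGetD_natCast]
      exact List.getD_eq_getElem _ _ hi
    have hchunk : (symbols.drop i).take (t+1) = (symbols.drop i).take t ++ [symbols[i + t]] := by
      rw [List.take_add_one]
      congr 1
      rw [List.getElem?_eq_getElem hdl]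
      simp
    rw [hget, hchunk, h4_append_singleton, Int.shiftLeft_eq]
    have hb := band3_bounds (symbols[i + t])
    have hh := h4_bounds ((symbols.drop i).take t)
    have hpow : (2:Int) ^ (32 - 2*t) = 2 ^ (30 - 2*t) * 4 := by
      rw [show 32 - 2*t = (30 - 2*t) + 2 by omega, pow_add]
      norm_num
    have hx : (0:Int) ≤ h4 ((symbols.drop i).take t) * 2 ^ (32 - 2*t) :=
      mul_nonneg hh.1 (by positivity)
    have hd : (2:Int) ^ (32 - 2*t) ∣ h4 ((symbols.drop i).take t) * 2 ^ (32 - 2*t) :=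
      Dvd.intro_left _ rfl
    have hy : (0:Int) ≤ PySem.Int.band (symbols[i + t]) 3 * 2 ^ (30 - 2*t) :=
      mul_nonneg hb.1 (by positivity)
    have hyk : PySem.Int.band (symbols[i + t]) 3 * 2 ^ (30 - 2*t) < 2 ^ (32 - 2*t) := by
      rw [hpow]
      have hp : (0:Int) < 2 ^ (30 - 2*t) := by positivity
      nlinarith
    rw [bor_disjoint _ _ (32 - 2*t) hx hd hy hyk]
    rw [show 32 - 2*(t+1) = 30 - 2*t by omega, hpow]
    ring

lemma wSpec_nil : wSpec [] = [] := by rw [wSpec]; simp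

lemma wSpec_cons (l : List Int) (h : l ≠ []) :
    wSpec l = (h4 (l.take 16) * 2 ^ (32 - 2 * (l.take 16).length)) :: wSpec (l.drop 16) := by
  rw [wSpec]; simp [h]

lemma pyA_loop_eq (symbols : List Int) : ∀ fuel i out, symbols.length - i ≤ fuel →
    pyA_loop symbols i out = out ++ wSpec (symbols.drop i) := by
  intro fuel
  induction fuel with
  | zero =>
    intro i out hf
    rw [pyA_loop, if_neg (by omega)]
    rw [List.drop_eq_nil_of_le (by omega), wSpec_nil, List.append_nil]
  | succ n ih =>
    intro i out hf
    rw [pyA_loop]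
    by_cases h : i < symbols.length
    · rw [if_pos h]
      have hdne : symbols.drop i ≠ [] := by
        intro hnil
        have := congrArg List.length hnil
        simp at this
        omega
      have h1 : 1 ≤ min 16 (symbols.length - i) := by omega
      rw [ih (i + min 16 (symbols.length - i)) _ (by omega)]
      rw [wSpec_cons _ hdne]
      have hc : (symbols.drop i).take 16 = (symbols.drop i).take (min 16 (symbols.length - i)) := by
        rw [show min 16 (symbols.length - i) = min 16 (symbols.drop i).length by simp]
        exact List.take_eq_take_min
      have hlen : ((symbols.drop i).take 16).length = min 16 (symbols.length - i) := by
        simp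
      have hword : pyA_word symbols i (min 16 (symbols.length - i)) =
          h4 ((symbols.drop i).take 16) * 2 ^ (32 - 2 * ((symbols.drop i).take 16).length) := by
        rw [pyA_word_eq symbols i _ (by omega) (by omega), ← hc, hlen]
      have htail : (symbols.drop i).drop 16 = symbols.drop (i + min 16 (symbols.length - i)) := by
        by_cases h16 : 16 ≤ symbols.length - i
        · rw [show min 16 (symbols.length - i) = 16 by omega, List.drop_drop]
        · rw [List.drop_eq_nil_of_le (by simp; omega)]
          exact (List.drop_eq_nil_of_le (by omega)).symm
      rw [hword, htail]
      simp
    · rw [if_neg h]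
      rw [List.drop_eq_nil_of_le (by omega), wSpec_nil, List.append_nil]

lemma a_eq_wSpec (symbols : List Int) : symbols2_to_words_py symbols = wSpec symbols := by
  have := pyA_loop_eq symbols symbols.length 0 [] (by omega)
  simpa [symbols2_to_words_py] using this

-- the final 'if count:' flush of Source B, named for the proofs (the port inlines the same expression)
def pyB_fin (st : List Int × Int × Int) : List Int :=
  if st.2.2 ≠ 0 then st.1 ++ [st.2.1 <<< (32 - 2 * st.2.2).toNat] else st.1

lemma pyB_fold_eq : ∀ (l p out : List Int), p.length < 16 →
    pyB_fin (l.foldl pyB_step (out, h4 p, (p.length : Int))) = out ++ wSpec (p ++ l) := by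
  intro l
  induction l with
  | nil =>
    intro p out hp
    rw [List.foldl_nil, List.append_nil]
    by_cases hpe : p = []
    · subst hpe
      simp [pyB_fin, wSpec_nil]
    · have h0 : p.length ≠ 0 := fun hh => hpe (List.eq_nil_of_length_eq_zero hh)
      unfold pyB_fin
      rw [if_pos (by simpa using h0)]
      rw [wSpec_cons p hpe, List.take_of_length_le (by omega),
          List.drop_eq_nil_of_le (by omega), wSpec_nil]
      rw [Int.shiftLeft_eq, show ((32 - 2 * ((p.length : Int))).toNat) = 32 - 2 * p.length by omega]
  | cons x t ih =>
    intro p out hp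
    rw [List.foldl_cons]
    have hstep : pyB_step (out, h4 p, (p.length : Int)) x =
        if p.length + 1 = 16 then (out ++ [h4 (p ++ [x])], 0, 0)
        else (out, h4 (p ++ [x]), ((p ++ [x]).length : Int)) := by
      unfold pyB_step
      simp only [h4_append_singleton, List.length_append, List.length_cons, List.length_nil]
      by_cases h16 : p.length + 1 = 16
      · rw [if_pos (by simp; omega), if_pos h16]
      · rw [if_neg (by simp; omega), if_neg h16]
        have : ((p.length : Int)) + 1 = ((p.length + 1 : Nat) : Int) := by push_cast; ring
        rw [this]
    rw [hstep]
    by_cases h16 : p.length + 1 = 16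
    · rw [if_pos h16]
      have h4nil : (0 : Int) = h4 [] := rfl
      have hcnt : (0 : Int) = ((([] : List Int).length : Nat) : Int) := rfl
      rw [show ((out ++ [h4 (p ++ [x])], (0:Int), (0:Int)))
            = (out ++ [h4 (p ++ [x])], h4 [], ((([] : List Int).length : Nat) : Int)) from rfl]
      rw [ih [] (out ++ [h4 (p ++ [x])]) (by norm_num), List.nil_append]
      have hq : p ++ x :: t = (p ++ [x]) ++ t := by simp
      have hq16 : (p ++ [x]).length = 16 := by simp; omega
      rw [hq, wSpec_cons ((p ++ [x]) ++ t) (by simp)]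
      rw [show (16:Nat) = (p ++ [x]).length from hq16.symm, List.take_left, List.drop_left]
      rw [hq16, show 32 - 2 * 16 = 0 by omega, pow_zero, mul_one]
      simp
    · rw [if_neg h16]
      have hlen : (p ++ [x]).length < 16 := by simp; omega
      rw [ih (p ++ [x]) out hlen]
      simp
lemma b_eq_wSpec (symbols : List Int) : symbols2_to_words_py_alt symbols = wSpec symbols := by
  have h := pyB_fold_eq symbols [] [] (by norm_num)
  simpa [pyB_fin, symbols2_to_words_py_alt, h4] using h

-- ===== VERDICT (by name: the statement is the Claim_ definition above) =====
theorem symbols2_to_words_py_spec : Claim_equal_symbols2_to_words_py := by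
  intro symbols _
  unfold Spec_symbols2_to_words_py
  rw [a_eq_wSpec, b_eq_wSpec]
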